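-- pv_equiv track=rewrite | github.com/Wulfic/Cicada3301 | tools/archive/master_solver.py | generate_pi_key
-- ===== SOURCE A (Python) =====
-- from typing import List, Dict, Tuple, Optional
--
-- def generate_pi_key(length: int) -> List[int]:
--     """Generate key from pi digits mod 29"""
--     # Pi digits (first 1000)
--     pi_str = "31415926535897932384626433832795028841971693993751058209749445923078164062862089986280348253421170679"
--     key = []
--     for i in range(min(length, len(pi_str))):
--         key.append(int(pi_str[i]) % 29)
--     # Extend if needed by cycling
--     while len(key) < length:
--         key.extend(key[:length - len(key)])
--     return key[:length]
-- ===== SOURCE B (Python) =====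
-- def generate_pi_key(length: int):
--     """Generate key from pi digits mod 29 (direct modular indexing, no extension loop)"""
--     pi_str = "31415926535897932384626433832795028841971693993751058209749445923078164062862089986280348253421170679"
--     return [int(pi_str[i % len(pi_str)]) % 29 for i in range(length)]
-- ===== Notes on version B (the rewrite author's own statement) =====
-- stated objective: simpler
-- what changed: Replaced the two-phase build (prefix fill plus a geometric while-loop that repeatedly extends the key with its own prefixes) by a single comprehension that computes each position directly as pi_str[i % 101] mod 29.
import Mathlib
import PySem

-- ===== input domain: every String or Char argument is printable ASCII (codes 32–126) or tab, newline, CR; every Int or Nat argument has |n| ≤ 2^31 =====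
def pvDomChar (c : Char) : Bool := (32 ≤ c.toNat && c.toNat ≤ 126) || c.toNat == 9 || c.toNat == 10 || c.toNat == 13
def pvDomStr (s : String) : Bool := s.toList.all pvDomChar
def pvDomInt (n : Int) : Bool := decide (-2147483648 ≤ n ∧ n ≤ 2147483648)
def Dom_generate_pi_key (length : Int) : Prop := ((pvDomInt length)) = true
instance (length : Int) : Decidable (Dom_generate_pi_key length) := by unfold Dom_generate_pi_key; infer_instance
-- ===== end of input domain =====

-- B replaces A's prefix-fill + geometric self-extension loop with one direct map i ↦ digit(i mod 101); same values.
-- ===== PORT A =====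
def pvPiStr : String := "31415926535897932384626433832795028841971693993751058209749445923078164062862089986280348253421170679"

-- int(pi_str[i]) % 29 ; the index is always in range and the character a digit, so the getD defaults never fire
def pvDigitAt (i : Int) : Int :=
  PySem.Int.mod ((PySem.Int.ofChars? (((PySem.Str.pyGet? pvPiStr i).map (fun c => [c])).getD [])).getD 0) 29

-- while len(key) < length: key.extend(key[:length - len(key)])   (key ≠ [] guard only for totality:
-- with key = [] and positive length Python loops forever; that state is unreachable from generate_pi_key)
def pvExtendLoop (length : Int) (key : List Int) : List Int :=
  if h : (key.length : Int) < length ∧ key ≠ [] then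
    pvExtendLoop length (key ++ PySem.List.slice key none (some (length - (key.length : Int))))
  else key
termination_by (length - (key.length : Int)).toNat
decreasing_by
  rcases h with ⟨hlt, hne⟩
  have h0 : (0:Int) ≤ length - (key.length : Int) := by omega
  rw [PySem.List.slice_to _ h0]
  simp only [List.length_append, List.length_take]
  have hk : 0 < key.length := List.length_pos_iff.mpr hne
  have h1 : 0 < (length - (key.length : Int)).toNat := by omega
  omega

def generate_pi_key (length : Int) : List Int :=
  let key := (PySem.List.pyRange 0 (min length ((pvPiStr.length : Int))) 1).map pvDigitAt
  let key := pvExtendLoop length key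
  PySem.List.slice key none (some length)

-- ===== PORT B =====
def generate_pi_key_alt (length : Int) : List Int :=
  (PySem.List.pyRange 0 length 1).map
    (fun i => pvDigitAt (PySem.Int.mod i ((pvPiStr.length : Int))))

-- ===== PRECONDITION & SPEC =====
def Spec_generate_pi_key (length : Int) (out : List Int) : Prop := out = generate_pi_key_alt length
instance (length : Int) (out : List Int) : Decidable (Spec_generate_pi_key length out) := by unfold Spec_generate_pi_key; infer_instance

-- ===== CLAIM (what is proved, stated in full; the proofs are below) =====
def Claim_equal_generate_pi_key : Prop := ∀ (length : Int), Dom_generate_pi_key length → Spec_generate_pi_key length (generate_pi_key length)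

-- ===== LEMMAS AND PROOFS =====

-- the periodic sequence both programs produce a prefix of
def pvCyc (n : Nat) : List Int := (List.range n).map (fun k => pvDigitAt ((k % 101 : Nat) : Int))

theorem pvPiStr_length : pvPiStr.length = 101 := by decide

theorem pvCyc_length (n : Nat) : (pvCyc n).length = n := by simp [pvCyc]

theorem pvCyc_take (n t : Nat) : (pvCyc n).take t = pvCyc (min t n) := by
  unfold pvCyc
  rw [← List.map_take, List.take_range]

theorem pvCyc_append (m s : Nat) (h : 101 ∣ m) : pvCyc m ++ pvCyc s = pvCyc (m + s) := by
  unfold pvCyc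
  rw [List.range_add, List.map_append, List.map_map]
  congr 1
  apply List.map_congr_left
  intro k _
  simp only [Function.comp]
  congr 2
  omega

theorem pvLoop_eq (length : Int) (m : Nat) (h0 : 0 < m) (hle : m ≤ length.toNat)
    (hdiv : 101 ∣ m ∨ m = length.toNat) :
    pvExtendLoop length (pvCyc m) = pvCyc length.toNat := by
  by_cases hm : m < length.toNat
  · have hpos : (0:Int) < length := by omega
    rw [pvExtendLoop]
    have hcond : ((pvCyc m).length : Int) < length ∧ pvCyc m ≠ [] := by
      constructor
      · rw [pvCyc_length]; omega
      · intro hnil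
        have := pvCyc_length m
        rw [hnil] at this; simp at this; omega
    rw [dif_pos hcond]
    have hnn : (0:Int) ≤ length - ((pvCyc m).length : Int) := by rw [pvCyc_length]; omega
    rw [PySem.List.slice_to _ hnn, pvCyc_length]
    have ht : (length - (m:Int)).toNat = length.toNat - m := by omega
    rw [ht, pvCyc_take]
    have hdiv' : 101 ∣ m := by
      rcases hdiv with h | h
      · exact h
      · omega
    rw [pvCyc_append m _ hdiv']
    have hrec := pvLoop_eq length (m + min (length.toNat - m) m)
      (by omega) (by omega)
      (by
        by_cases hc : length.toNat - m ≤ m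
        · right; omega
        · left
          have : min (length.toNat - m) m = m := by omega
          rw [this]
          exact (Nat.dvd_add_right hdiv').mpr hdiv')
    exact hrec
  · have : m = length.toNat := by omega
    rw [this, pvExtendLoop, dif_neg]
    intro ⟨hlt, _⟩
    rw [pvCyc_length] at hlt
    omega
termination_by length.toNat - m
decreasing_by omega

theorem pvPhase1_eq (length : Int) :
    (PySem.List.pyRange 0 (min length ((pvPiStr.length : Int))) 1).map pvDigitAt
      = pvCyc (min length 101).toNat := by
  rw [pvPiStr_length, PySem.List.pyRange_one, List.map_map]
  unfold pvCyc
  simp only [Int.sub_zero, Nat.cast_ofNat]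
  apply List.map_congr_left
  intro k hk
  simp only [List.mem_range] at hk
  have h101 : k < 101 := by omega
  simp only [Function.comp, zero_add]
  congr 1
  omega

theorem pvAlt_eq (length : Int) : generate_pi_key_alt length = pvCyc length.toNat := by
  unfold generate_pi_key_alt
  rw [pvPiStr_length, PySem.List.pyRange_one, List.map_map]
  unfold pvCyc
  simp only [Int.sub_zero, Nat.cast_ofNat]
  apply List.map_congr_left
  intro k hk
  simp only [List.mem_range] at hk
  simp only [Function.comp, zero_add]
  congr 1
  rw [show ((101:Int)) = ((101:Nat):Int) by norm_num, PySem.Int.mod_natCast]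

-- ===== VERDICT (by name: the statement is the Claim_ definition above) =====
theorem generate_pi_key_spec : Claim_equal_generate_pi_key := by
  intro length _
  unfold Spec_generate_pi_key
  rw [pvAlt_eq]
  simp only [generate_pi_key]
  rw [pvPhase1_eq]
  by_cases hpos : 0 < length
  · have hloop := pvLoop_eq length (min length 101).toNat (by omega) (by omega)
      (by by_cases h : length ≤ 101
          · right; omega
          · left
            have : (min length 101).toNat = 101 := by omega
            rw [this])
    rw [hloop]
    rw [PySem.List.slice_to _ (by omega)]
    rw [List.take_of_length_le (by rw [pvCyc_length])]
  · have h1 : (min length 101).toNat = 0 := by omega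
    have h2 : length.toNat = 0 := by omega
    rw [h1, h2]
    simp only [pvCyc, List.range_zero, List.map_nil]
    rw [pvExtendLoop, dif_neg (by intro ⟨_, hne⟩; exact hne rfl)]
    simp [PySem.List.slice]
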